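-- pv_equiv track=rewrite | github.com/joshanashakya/dissertation | workspace/dataset/java-python/GeeksForGeeks/4133/A/2.py | Xor_Sum
-- ===== SOURCE A (Python) =====
-- def Xor_Sum(arr, n):
--
--     sum = 0
--     index, left_xor = 0, 0
--     right_xor = 0
--
--     # Traverse through the array
--     for i in range(n):
--
--         # Calculate xor of elements left of index i
--         # including ith element
--         left_xor = left_xor ^ arr[i]
--         right_xor = 0
--
--         for j in range(i + 1, n):
--
--             # Calculate xor of the elements
--             # right of index i
--             right_xor = right_xor ^ arr[j]
--
--         # Keep the maximum possible xor sum
--         if (left_xor + right_xor > sum):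
--             sum = left_xor + right_xor
--             index = i
--
--     # Return the 1 based index of the array
--     return index + 1
-- ===== SOURCE B (Python) =====
-- def Xor_Sum(arr, n):
--     # Staged passes: build the prefix-XOR list once, derive each candidate sum
--     # left + (total ^ left) from it, then answer with max() and list.index().
--     if n <= 0:
--         return 1
--     prefixes = []
--     acc = 0
--     for i in range(n):
--         acc = acc ^ arr[i]
--         prefixes.append(acc)
--     total = prefixes[-1]
--     sums = [p + (total ^ p) for p in prefixes]
--     best = max(sums)
--     if best <= 0:
--         return 1
--     return sums.index(best) + 1
-- ===== Notes on version B (the rewrite author's own statement) =====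
-- stated objective: faster
-- what changed: A recomputes the right-side XOR with an inner loop for every index; B builds the prefix-XOR list in one pass, derives each candidate sum as p + (total ^ p), and answers with max() plus list.index() instead of A's running argmax loop.
import Mathlib
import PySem

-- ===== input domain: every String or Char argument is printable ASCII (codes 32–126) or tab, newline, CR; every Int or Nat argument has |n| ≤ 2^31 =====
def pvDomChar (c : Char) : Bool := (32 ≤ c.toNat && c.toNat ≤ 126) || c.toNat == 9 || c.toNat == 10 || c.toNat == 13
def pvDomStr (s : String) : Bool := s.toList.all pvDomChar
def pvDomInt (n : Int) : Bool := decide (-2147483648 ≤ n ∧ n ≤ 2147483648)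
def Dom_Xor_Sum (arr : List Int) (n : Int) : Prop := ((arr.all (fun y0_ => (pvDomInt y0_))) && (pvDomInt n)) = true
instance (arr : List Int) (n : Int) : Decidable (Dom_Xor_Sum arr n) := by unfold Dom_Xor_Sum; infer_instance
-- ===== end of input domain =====

-- B drops A's quadratic inner right-XOR loop: one prefix-XOR pass, then max/index over the candidate sums.

-- ===== PORT A =====
def Xor_Sum (arr : List Int) (n : Int) : Int :=
  let st := (PySem.List.pyRange 0 n 1).foldl
    (fun (s : Int × Int × Int) i =>
      let left_xor := PySem.Int.bxor s.2.2 (PySem.List.pyGetD arr i 0)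
      let right_xor := (PySem.List.pyRange (i + 1) n 1).foldl
        (fun r j => PySem.Int.bxor r (PySem.List.pyGetD arr j 0)) 0
      if left_xor + right_xor > s.1 then (left_xor + right_xor, i, left_xor)
      else (s.1, s.2.1, left_xor))
    (0, 0, 0)
  st.2.1 + 1

-- ===== PORT B =====
def Xor_Sum_alt (arr : List Int) (n : Int) : Int :=
  if n ≤ 0 then 1
  else
    let pa := (PySem.List.pyRange 0 n 1).foldl
      (fun (p : List Int × Int) i =>
        let acc := PySem.Int.bxor p.2 (PySem.List.pyGetD arr i 0)
        (p.1 ++ [acc], acc)) ([], 0)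
    let total := PySem.List.pyGetD pa.1 (-1) 0
    let sums := pa.1.map (fun p => p + PySem.Int.bxor total p)
    match PySem.List.max? sums (fun y => y) with
    | none => 1          -- unreachable (n > 0): totalisation guard for Python's max on a nonempty list
    | some best =>
      if best ≤ 0 then 1
      else
        match PySem.List.index? sums best with
        | none => 1      -- unreachable: best ∈ sums
        | some k => (k : Int) + 1

-- ===== PRECONDITION & SPEC =====
-- Pre_ excludes exactly the inputs where Python's arr[i] raises IndexError (n > len(arr)).
def Pre_Xor_Sum (arr : List Int) (n : Int) : Prop := n ≤ (arr.length : Int)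
instance (arr : List Int) (n : Int) : Decidable (Pre_Xor_Sum arr n) := by unfold Pre_Xor_Sum; infer_instance
def pvWitness_Xor_Sum : List Int × Int := ([2, 1, 7, 4], 4)

def Spec_Xor_Sum (arr : List Int) (n : Int) (out : Int) : Prop := out = Xor_Sum_alt arr n
instance (arr : List Int) (n : Int) (out : Int) : Decidable (Spec_Xor_Sum arr n out) := by unfold Spec_Xor_Sum; infer_instance

-- ===== CLAIM (what is proved, stated in full; the proofs are below) =====
def Claim_equal_Xor_Sum : Prop := ∀ (arr : List Int) (n : Int), Dom_Xor_Sum arr n → Pre_Xor_Sum arr n → Spec_Xor_Sum arr n (Xor_Sum arr n)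

-- ===== LEMMAS AND PROOFS =====

-- encoding of Int as (magnitude, sign) matching bxor's two's-complement case analysis
def pvEnc (x : Nat) (s : Bool) : Int := if s then -(x : Int) - 1 else (x : Int)

theorem pvEnc_bxor (x y : Nat) (s t : Bool) :
    PySem.Int.bxor (pvEnc x s) (pvEnc y t) = pvEnc (x ^^^ y) (xor s t) := by
  cases s <;> cases t <;>
    simp [pvEnc, PySem.Int.bxor] <;>
    first
      | rfl
      | (intro h; exact absurd h (by omega))
      | (rw [if_neg (by omega), if_neg (by omega)])

theorem pvEnc_repr (a : Int) : ∃ x s, a = pvEnc x s := by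
  by_cases h : 0 ≤ a
  · exact ⟨a.toNat, false, by simp [pvEnc]; omega⟩
  · exact ⟨(-a - 1).toNat, true, by simp [pvEnc]; omega⟩

theorem bxor_assoc' (a b c : Int) :
    PySem.Int.bxor (PySem.Int.bxor a b) c = PySem.Int.bxor a (PySem.Int.bxor b c) := by
  obtain ⟨x, s, rfl⟩ := pvEnc_repr a
  obtain ⟨y, t, rfl⟩ := pvEnc_repr b
  obtain ⟨z, u, rfl⟩ := pvEnc_repr c
  rw [pvEnc_bxor, pvEnc_bxor, pvEnc_bxor, pvEnc_bxor, Nat.xor_assoc, Bool.xor_assoc]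

theorem bxor_cancel_left (x y : Int) : PySem.Int.bxor (PySem.Int.bxor x y) x = y := by
  rw [PySem.Int.bxor_comm, ← bxor_assoc', PySem.Int.bxor_self]
  rw [PySem.Int.bxor_comm, PySem.Int.bxor_zero]

-- XOR of arr[a:b] (via indices)
def pvXr (arr : List Int) (a b : Int) : Int :=
  (PySem.List.pyRange a b 1).foldl (fun r j => PySem.Int.bxor r (PySem.List.pyGetD arr j 0)) 0

theorem foldl_bxor_init (arr : List Int) (l : List Int) (init : Int) :
    l.foldl (fun r j => PySem.Int.bxor r (PySem.List.pyGetD arr j 0)) init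
      = PySem.Int.bxor init (l.foldl (fun r j => PySem.Int.bxor r (PySem.List.pyGetD arr j 0)) 0) := by
  induction l generalizing init with
  | nil => simp [PySem.Int.bxor_zero]
  | cons h t ih =>
      simp only [List.foldl_cons]
      rw [ih, ih (PySem.Int.bxor 0 _), ← bxor_assoc']
      rw [PySem.Int.bxor_comm 0 (PySem.List.pyGetD arr h 0), PySem.Int.bxor_zero]

theorem pvXr_split (arr : List Int) (a m b : Int) (h1 : a ≤ m) (h2 : m ≤ b) :
    pvXr arr a b = PySem.Int.bxor (pvXr arr a m) (pvXr arr m b) := by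
  unfold pvXr
  rw [PySem.List.pyRange_one_append a m b h1 h2, List.foldl_append, foldl_bxor_init]

theorem pvXr_succ (arr : List Int) (a : Int) (h : 0 ≤ a) :
    pvXr arr 0 (a + 1) = PySem.Int.bxor (pvXr arr 0 a) (PySem.List.pyGetD arr a 0) := by
  rw [pvXr_split arr 0 a (a + 1) h (by omega)]
  congr 1
  unfold pvXr
  rw [PySem.List.pyRange_one_singleton]
  simp only [List.foldl_cons, List.foldl_nil]
  rw [PySem.Int.bxor_comm, PySem.Int.bxor_zero]

-- the candidate sum at index i, with the total XOR t
def pvS (arr : List Int) (t : Int) (i : Int) : Int :=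
  pvXr arr 0 (i + 1) + PySem.Int.bxor t (pvXr arr 0 (i + 1))

-- A's loop body
def pvStepA (arr : List Int) (n : Int) (s : Int × Int × Int) (i : Int) : Int × Int × Int :=
  if PySem.Int.bxor s.2.2 (PySem.List.pyGetD arr i 0) +
       (PySem.List.pyRange (i + 1) n 1).foldl
         (fun r j => PySem.Int.bxor r (PySem.List.pyGetD arr j 0)) 0 > s.1 then
    (PySem.Int.bxor s.2.2 (PySem.List.pyGetD arr i 0) +
       (PySem.List.pyRange (i + 1) n 1).foldl
         (fun r j => PySem.Int.bxor r (PySem.List.pyGetD arr j 0)) 0,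
     i, PySem.Int.bxor s.2.2 (PySem.List.pyGetD arr i 0))
  else (s.1, s.2.1, PySem.Int.bxor s.2.2 (PySem.List.pyGetD arr i 0))

-- the pure argmax step A's loop amounts to once the inner loop is expressed through pvS
def pvArg (arr : List Int) (t : Int) (s : Int × Int) (i : Int) : Int × Int :=
  if pvS arr t i > s.1 then (pvS arr t i, i) else s

theorem pvPrefix (arr : List Int) (n : Int) (k : Nat) :
    ∀ (a : Int), 0 ≤ a → (n - a).toNat = k → ∀ (L : List Int),
      (PySem.List.pyRange a n 1).foldl
        (fun (p : List Int × Int) i =>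
          (p.1 ++ [PySem.Int.bxor p.2 (PySem.List.pyGetD arr i 0)],
           PySem.Int.bxor p.2 (PySem.List.pyGetD arr i 0))) (L, pvXr arr 0 a)
        = (L ++ (PySem.List.pyRange a n 1).map (fun i => pvXr arr 0 (i + 1)), pvXr arr 0 (max a n)) := by
  induction k with
  | zero =>
      intro a ha hk L
      rw [PySem.List.pyRange_one_eq_nil (by omega)]
      simp only [List.foldl_nil, List.map_nil, List.append_nil]
      have : max a n = a := by omega
      rw [this]
  | succ k ih =>
      intro a ha hk L
      have hlt : a < n := by omega
      rw [PySem.List.pyRange_one_cons hlt]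
      simp only [List.foldl_cons, List.map_cons]
      rw [← pvXr_succ arr a ha]
      rw [ih (a + 1) (by omega) (by omega) (L ++ [pvXr arr 0 (a + 1)])]
      rw [List.append_assoc]
      have : max a n = max (a + 1) n := by omega
      rw [this]
      rfl
theorem pvAtoArg (arr : List Int) (n : Int) (k : Nat) :
    ∀ (a : Int), 0 ≤ a → (n - a).toNat = k → ∀ (sm idx : Int),
      (PySem.List.pyRange a n 1).foldl (pvStepA arr n) (sm, idx, pvXr arr 0 a)
        = (((PySem.List.pyRange a n 1).foldl (pvArg arr (pvXr arr 0 n)) (sm, idx)).1,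
           ((PySem.List.pyRange a n 1).foldl (pvArg arr (pvXr arr 0 n)) (sm, idx)).2,
           pvXr arr 0 (max a n)) := by
  induction k with
  | zero =>
      intro a ha hk sm idx
      rw [PySem.List.pyRange_one_eq_nil (by omega)]
      simp only [List.foldl_nil]
      have : max a n = a := by omega
      rw [this]
  | succ k ih =>
      intro a ha hk sm idx
      have hlt : a < n := by omega
      have hsucc := pvXr_succ arr a ha
      rw [PySem.List.pyRange_one_cons hlt]
      simp only [List.foldl_cons]
      have hr2 : (PySem.List.pyRange (a + 1) n 1).foldl
          (fun r j => PySem.Int.bxor r (PySem.List.pyGetD arr j 0)) 0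
          = PySem.Int.bxor (pvXr arr 0 n) (pvXr arr 0 (a + 1)) := by
        rw [pvXr_split arr 0 (a + 1) n (by omega) (by omega), bxor_cancel_left]
        rfl
      have hstep : pvStepA arr n (sm, idx, pvXr arr 0 a) a
          = ((pvArg arr (pvXr arr 0 n) (sm, idx) a).1,
             (pvArg arr (pvXr arr 0 n) (sm, idx) a).2, pvXr arr 0 (a + 1)) := by
        unfold pvStepA pvArg pvS
        rw [hr2, ← hsucc]
        split <;> rfl
      rw [hstep]
      rcases h2 : pvArg arr (pvXr arr 0 n) (sm, idx) a with ⟨b1, i1⟩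
      rw [ih (a + 1) (by omega) (by omega) b1 i1]
      have : max a n = max (a + 1) n := by omega
      rw [this]
theorem pvMaxIdx (arr : List Int) (t n : Int) (k : Nat) :
    ∀ (a : Int), 0 ≤ a → (n - a).toNat = k → ∀ (b ix : Int),
      (PySem.List.pyRange a n 1).foldl (pvArg arr t) (b, ix)
        = match (PySem.List.pyRange a n 1).map (pvS arr t) with
          | [] => (b, ix)
          | x :: tl =>
              if b < tl.foldl max x then
                (tl.foldl max x, a + (List.idxOf (tl.foldl max x) (x :: tl) : Int))
              else (b, ix) := by
  induction k with
  | zero =>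
      intro a ha hk b ix
      rw [PySem.List.pyRange_one_eq_nil (by omega)]
      rfl
  | succ k ih =>
      intro a ha hk b ix
      have hlt : a < n := by omega
      rw [PySem.List.pyRange_one_cons hlt]
      simp only [List.foldl_cons, List.map_cons]
      by_cases hb : b < pvS arr t a
      · have h2 : pvArg arr t (b, ix) a = (pvS arr t a, a) := by
          unfold pvArg; rw [if_pos hb]
        rw [h2, ih (a + 1) (by omega) (by omega) (pvS arr t a) a]
        rcases hmap : (PySem.List.pyRange (a + 1) n 1).map (pvS arr t) with _ | ⟨x', tl'⟩
        · simp only [List.foldl_nil]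
          rw [if_pos hb, List.idxOf_cons_self]
          simp
        · have hM : (x' :: tl').foldl max (pvS arr t a) = max (pvS arr t a) (tl'.foldl max x') := by
            simp only [List.foldl_cons]
            exact List.foldl_assoc
          simp only [hM]
          set Sa := pvS arr t a with hSa
          set Mr := tl'.foldl max x' with hMr
          by_cases hr : Sa < Mr
          · rw [if_pos hr, if_pos (by omega)]
            have hmax : max Sa Mr = Mr := by omega
            have hne : Sa ≠ Mr := by omega
            rw [hmax, List.idxOf_cons_ne _ hne, Prod.mk.injEq]
            refine ⟨rfl, by push_cast; ring⟩
          · rw [if_neg hr, if_pos (by omega)]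
            have hmax : max Sa Mr = Sa := by omega
            rw [hmax, List.idxOf_cons_self]
            simp
      · have h2 : pvArg arr t (b, ix) a = (b, ix) := by
          unfold pvArg; rw [if_neg hb]
        rw [h2, ih (a + 1) (by omega) (by omega) b ix]
        rcases hmap : (PySem.List.pyRange (a + 1) n 1).map (pvS arr t) with _ | ⟨x', tl'⟩
        · simp only [List.foldl_nil]
          rw [if_neg hb]
        · have hM : (x' :: tl').foldl max (pvS arr t a) = max (pvS arr t a) (tl'.foldl max x') := by
            simp only [List.foldl_cons]
            exact List.foldl_assoc
          simp only [hM]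
          set Sa := pvS arr t a with hSa
          set Mr := tl'.foldl max x' with hMr
          by_cases hr : b < Mr
          · rw [if_pos hr, if_pos (by omega)]
            have hmax : max Sa Mr = Mr := by omega
            have hne : Sa ≠ Mr := by omega
            rw [hmax, List.idxOf_cons_ne _ hne, Prod.mk.injEq]
            refine ⟨rfl, by push_cast; ring⟩
          · rw [if_neg hr, if_neg (by omega)]
theorem pvIdxOf?_of_mem (a : Int) (l : List Int) (h : a ∈ l) :
    List.idxOf? a l = some (List.idxOf a l) := by
  induction l with
  | nil => simp at h
  | cons x t ih =>
      by_cases hx : x = a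
      · subst hx; simp [List.idxOf?_cons, List.idxOf_cons_self]
      · rcases List.mem_cons.mp h with h' | h'
        · exact absurd h'.symm hx
        · simp [List.idxOf?_cons, List.idxOf_cons_ne _ hx, hx, ih h']

theorem pvLast (f : Int → Int) (m : Int) (hm : 0 ≤ m) :
    PySem.List.pyGetD ((PySem.List.pyRange 0 (m + 1) 1).map f) (-1) 0 = f m := by
  rw [PySem.List.pyRange_one_succ_right hm, List.map_append]
  exact PySem.List.pyGetD_neg_one_append_singleton _ _ _

-- ===== VERDICT (by name: the statement is the Claim_ definition above) =====
theorem Xor_Sum_spec : Claim_equal_Xor_Sum := by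
  intro arr n _ _
  unfold Spec_Xor_Sum
  by_cases hn : n ≤ 0
  · have hA : Xor_Sum arr n = 1 := by
      unfold Xor_Sum
      rw [PySem.List.pyRange_one_eq_nil hn]
      rfl
    have hB : Xor_Sum_alt arr n = 1 := by
      unfold Xor_Sum_alt
      rw [if_pos hn]
    rw [hA, hB]
  · have hn0 : 0 < n := by omega
    have h0 : pvXr arr 0 0 = 0 := by
      unfold pvXr
      rw [PySem.List.pyRange_one_eq_nil le_rfl]
      rfl
    have hA := pvAtoArg arr n n.toNat 0 le_rfl (by omega) 0 0
    rw [h0] at hA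
    have hMax := pvMaxIdx arr (pvXr arr 0 n) n n.toNat 0 le_rfl (by omega) 0 0
    have hpa := pvPrefix arr n n.toNat 0 le_rfl (by omega) []
    rw [h0] at hpa
    rw [show max (0 : Int) n = n by omega] at hpa
    simp only [List.nil_append] at hpa
    have htot : PySem.List.pyGetD
        (List.map (fun i => pvXr arr 0 (i + 1)) (PySem.List.pyRange 0 n 1)) (-1) 0
        = pvXr arr 0 n := by
      have h := pvLast (fun i => pvXr arr 0 (i + 1)) (n - 1) (by omega)
      rw [show n - 1 + 1 = n by ring] at h
      simpa using h
    have hsums : List.map (fun p => p + PySem.Int.bxor (pvXr arr 0 n) p)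
        (List.map (fun i => pvXr arr 0 (i + 1)) (PySem.List.pyRange 0 n 1))
        = List.map (pvS arr (pvXr arr 0 n)) (PySem.List.pyRange 0 n 1) := by
      rw [List.map_map]
      rfl
    rcases hmap : List.map (pvS arr (pvXr arr 0 n)) (PySem.List.pyRange 0 n 1) with _ | ⟨x, tl⟩
    · rw [PySem.List.pyRange_one_cons hn0] at hmap
      simp at hmap
    · have hmem : tl.foldl max x ∈ x :: tl := by
        rcases PySem.List.foldl_max_mem tl x with h | h
        · rw [h]; exact List.mem_cons_self
        · exact List.mem_cons_of_mem _ h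
      have hB : Xor_Sum_alt arr n
          = if tl.foldl max x ≤ 0 then 1
            else (List.idxOf (tl.foldl max x) (x :: tl) : Int) + 1 := by
        unfold Xor_Sum_alt
        rw [if_neg hn]
        simp only [hpa, htot, hsums, hmap, PySem.List.max?_id_cons,
          PySem.List.index?_eq_idxOf?, pvIdxOf?_of_mem _ _ hmem]
      have hA2 : Xor_Sum arr n
          = (if (0 : Int) < tl.foldl max x then
               ((tl.foldl max x, (0 : Int) + (List.idxOf (tl.foldl max x) (x :: tl) : Int)) : Int × Int)
             else ((0 : Int), (0 : Int))).2 + 1 := by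
        have hx : Xor_Sum arr n
            = (List.foldl (pvStepA arr n) (0, 0, 0) (PySem.List.pyRange 0 n 1)).2.1 + 1 := rfl
        rw [hx, hA]
        rw [hMax, hmap]
      rw [hA2, hB]
      split_ifs with h1 h2
      · omega
      · show 0 + (List.idxOf (tl.foldl max x) (x :: tl) : Int) + 1 = _
        rw [zero_add]
      · rfl
      · omega
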